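-- pv_equiv track=rewrite | github.com/timmybx/canary | canary/collectors/jenkins_advisories.py | _max_severity_label
-- ===== SOURCE A (Python) =====
-- from collections.abc import Iterable
--
-- _SEVERITY_ORDER = {"none": 0, "low": 1, "medium": 2, "high": 3, "critical": 4}
--
-- def _max_severity_label(labels: Iterable[str]) -> str | None:
--     best = None
--     best_v = -1
--     for lab in labels:
--         v = _SEVERITY_ORDER.get(str(lab).lower(), -1)
--         if v > best_v:
--             best_v = v
--             best = str(lab).lower()
--     return best
-- ===== SOURCE B (Python) =====
-- def _max_severity_label(labels):
--     present = {str(lab).lower() for lab in labels}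
--     for name in ("critical", "high", "medium", "low", "none"):
--         if name in present:
--             return name
--     return None
-- ===== Notes on version B (the rewrite author's own statement) =====
-- stated objective: idiomatic
-- what changed: Instead of scanning the labels while tracking a running maximum rank, B builds a set of the lowercased labels once and walks the fixed severity ranking from highest to lowest, returning the first name present.
import Mathlib
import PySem

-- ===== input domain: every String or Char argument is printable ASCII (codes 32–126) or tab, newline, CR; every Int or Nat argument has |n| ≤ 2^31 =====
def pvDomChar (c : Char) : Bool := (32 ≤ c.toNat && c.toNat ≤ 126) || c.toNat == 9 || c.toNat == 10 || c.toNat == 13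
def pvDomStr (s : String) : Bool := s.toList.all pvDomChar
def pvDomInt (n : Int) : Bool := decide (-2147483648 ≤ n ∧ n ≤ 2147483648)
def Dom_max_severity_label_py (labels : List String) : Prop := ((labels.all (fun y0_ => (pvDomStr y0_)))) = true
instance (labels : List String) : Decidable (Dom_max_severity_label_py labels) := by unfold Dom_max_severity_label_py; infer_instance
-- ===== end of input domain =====

-- B replaces A's running-maximum scan over the labels by a set of lowercased labels
-- plus one pass over the fixed severity ranking from highest to lowest (idiomatic, same cost).

-- ===== PORT A =====
def pvSev : PySem.Dict String Int :=
  PySem.Dict.ofList [("none", 0), ("low", 1), ("medium", 2), ("high", 3), ("critical", 4)]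

def pvALoop : List String → Option String → Int → Option String
  | [], best, _ => best
  | lab :: rest, best, best_v =>
    let v := pvSev.getD (PySem.Str.lower lab) (-1)
    if v > best_v then pvALoop rest (some (PySem.Str.lower lab)) v
    else pvALoop rest best best_v

def max_severity_label_py (labels : List String) : Option String :=
  pvALoop labels none (-1)

-- ===== PORT B =====
def pvOrder : List String := ["critical", "high", "medium", "low", "none"]

def max_severity_label_py_alt (labels : List String) : Option String :=
  let present : PySem.Set String := PySem.Set.ofList (labels.map PySem.Str.lower)
  pvOrder.find? (fun name => PySem.Set.contains present name)

-- ===== PRECONDITION & SPEC =====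
def Spec_max_severity_label_py (labels : List String) (out : Option String) : Prop := out = max_severity_label_py_alt labels
instance (labels : List String) (out : Option String) : Decidable (Spec_max_severity_label_py labels out) := by unfold Spec_max_severity_label_py; infer_instance

-- ===== CLAIM (what is proved, stated in full; the proofs are below) =====
def Claim_equal_max_severity_label_py : Prop := ∀ (labels : List String), Dom_max_severity_label_py labels → Spec_max_severity_label_py labels (max_severity_label_py labels)

-- ===== LEMMAS AND PROOFS =====

-- the rank A's dict assigns to an (already lowercased) string, as an if-chain
theorem pvRk_eq (s : String) :
    pvSev.getD s (-1) =
      (if s = "critical" then 4 else if s = "high" then 3 else if s = "medium" then 2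
       else if s = "low" then 1 else if s = "none" then 0 else -1) := by
  have hmk : pvSev = PySem.Dict.mk [("none", 0), ("low", 1), ("medium", 2), ("high", 3), ("critical", 4)] := by decide
  split_ifs with h1 h2 h3 h4 h5
  · subst h1; decide
  · subst h2; decide
  · subst h3; decide
  · subst h4; decide
  · subst h5; decide
  · rw [hmk]
    simp only [PySem.Dict.getD, PySem.Dict.get?_mk_cons, beq_iff_eq]
    rw [if_neg (Ne.symm h5), if_neg (Ne.symm h4), if_neg (Ne.symm h3), if_neg (Ne.symm h2),
      if_neg (Ne.symm h1)]
    rfl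

-- running maximum of the ranks, as A's loop maintains it
def pvMr : List String → Int → Int
  | [], b => b
  | lab :: rest, b => pvMr rest (max b (pvSev.getD (PySem.Str.lower lab) (-1)))

-- the canonical name of a rank (none for -1)
def pvName (r : Int) : Option String :=
  if r = 4 then some "critical" else if r = 3 then some "high" else if r = 2 then some "medium"
  else if r = 1 then some "low" else if r = 0 then some "none" else none

theorem pvMr_ge_init (ls : List String) : ∀ b : Int, b ≤ pvMr ls b := by
  induction ls with
  | nil => intro b; exact le_refl b
  | cons x rest ih => intro b; exact le_trans (le_max_left _ _) (ih _)

theorem pvMr_le (ls : List String) : ∀ b : Int, b ≤ 4 → pvMr ls b ≤ 4 := by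
  induction ls with
  | nil => intro b h; exact h
  | cons lab rest ih =>
    intro b h
    have hr := pvRk_eq (PySem.Str.lower lab)
    exact ih _ (by split_ifs at hr <;> omega)

theorem pvALoop_eq (ls : List String) : ∀ b : Int, -1 ≤ b →
    pvALoop ls (pvName b) b = pvName (pvMr ls b) := by
  induction ls with
  | nil => intro b _; rfl
  | cons lab rest ih =>
    intro b h1
    have hr := pvRk_eq (PySem.Str.lower lab)
    simp only [pvALoop, pvMr]
    by_cases hgt : pvSev.getD (PySem.Str.lower lab) (-1) > b
    · rw [if_pos hgt]
      have hname : some (PySem.Str.lower lab) = pvName (pvSev.getD (PySem.Str.lower lab) (-1)) := by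
        split_ifs at hr <;> simp_all [pvName] <;> omega
      have hmax : max b (pvSev.getD (PySem.Str.lower lab) (-1)) =
          pvSev.getD (PySem.Str.lower lab) (-1) := by omega
      rw [hname, hmax]
      exact ih _ (by omega)
    · rw [if_neg hgt]
      have hmax : max b (pvSev.getD (PySem.Str.lower lab) (-1)) = b := by omega
      rw [hmax]; exact ih b h1

-- every label's rank is at most the running maximum
theorem pvMem_le_mr (ls : List String) : ∀ b : Int, ∀ lab ∈ ls,
    pvSev.getD (PySem.Str.lower lab) (-1) ≤ pvMr ls b := by
  induction ls with
  | nil => intro _ lab h; cases h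
  | cons x rest ih =>
    intro b lab hmem
    simp only [pvMr]
    rcases List.mem_cons.1 hmem with h | h
    · subst h; exact le_trans (le_max_right _ _) (pvMr_ge_init rest _)
    · exact ih _ lab h

-- the running maximum, if above its seed, is the rank of some label
theorem pvMr_attained (ls : List String) : ∀ b : Int,
    pvMr ls b = b ∨ ∃ lab ∈ ls, pvMr ls b = pvSev.getD (PySem.Str.lower lab) (-1) := by
  induction ls with
  | nil => intro b; exact Or.inl rfl
  | cons x rest ih =>
    intro b
    simp only [pvMr]
    rcases ih (max b (pvSev.getD (PySem.Str.lower x) (-1))) with h | ⟨lab, hmem, heq⟩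
    · rcases max_choice b (pvSev.getD (PySem.Str.lower x) (-1)) with hm | hm
      · exact Or.inl (by rw [h, hm])
      · exact Or.inr ⟨x, List.mem_cons_self, by rw [h, hm]⟩
    · exact Or.inr ⟨lab, List.mem_cons_of_mem _ hmem, heq⟩

theorem pvB_eq (ls : List String) :
    max_severity_label_py_alt ls = pvName (pvMr ls (-1)) := by
  have hge : (-1 : Int) ≤ pvMr ls (-1) := pvMr_ge_init ls (-1)
  have hle : pvMr ls (-1) ≤ 4 := pvMr_le ls (-1) (by norm_num)
  have hA : ∀ n : String, n ∈ ls.map PySem.Str.lower →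
      pvSev.getD n (-1) ≤ pvMr ls (-1) := by
    intro n hn
    rcases List.mem_map.1 hn with ⟨lab, hlab, rfl⟩
    exact pvMem_le_mr ls (-1) lab hlab
  have hB : pvMr ls (-1) ≠ -1 → ∃ n ∈ ls.map PySem.Str.lower,
      pvSev.getD n (-1) = pvMr ls (-1) := by
    intro hne
    rcases pvMr_attained ls (-1) with h | ⟨lab, hmem, heq⟩
    · exact absurd h hne
    · exact ⟨PySem.Str.lower lab, List.mem_map_of_mem hmem, heq.symm⟩
  have hrkC : pvSev.getD "critical" (-1) = 4 := by rw [pvRk_eq]; simp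
  have hrkH : pvSev.getD "high" (-1) = 3 := by rw [pvRk_eq]; simp
  have hrkM : pvSev.getD "medium" (-1) = 2 := by rw [pvRk_eq]; simp
  have hrkL : pvSev.getD "low" (-1) = 1 := by rw [pvRk_eq]; simp
  have hrkN : pvSev.getD "none" (-1) = 0 := by rw [pvRk_eq]; simp
  have hnotmem : ∀ n : String, pvSev.getD n (-1) > pvMr ls (-1) →
      n ∉ ls.map PySem.Str.lower := by
    intro n h hmem; have := hA n hmem; omega
  have hcases : pvMr ls (-1) = -1 ∨ pvMr ls (-1) = 0 ∨ pvMr ls (-1) = 1 ∨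
      pvMr ls (-1) = 2 ∨ pvMr ls (-1) = 3 ∨ pvMr ls (-1) = 4 := by omega
  simp only [max_severity_label_py_alt, pvOrder, List.find?, PySem.Set.contains_eq_listContains]
  rcases hcases with hm | hm | hm | hm | hm | hm <;> rw [hm] <;>
    [skip;
     (obtain ⟨n, hn, hrk⟩ := hB (by omega);
      have hrn := pvRk_eq n;
      have hneq : n = "none" := by rw [hm] at hrk; split_ifs at hrn <;> omega);
     (obtain ⟨n, hn, hrk⟩ := hB (by omega);
      have hrn := pvRk_eq n;
      have hneq : n = "low" := by rw [hm] at hrk; split_ifs at hrn <;> omega);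
     (obtain ⟨n, hn, hrk⟩ := hB (by omega);
      have hrn := pvRk_eq n;
      have hneq : n = "medium" := by rw [hm] at hrk; split_ifs at hrn <;> omega);
     (obtain ⟨n, hn, hrk⟩ := hB (by omega);
      have hrn := pvRk_eq n;
      have hneq : n = "high" := by rw [hm] at hrk; split_ifs at hrn <;> omega);
     (obtain ⟨n, hn, hrk⟩ := hB (by omega);
      have hrn := pvRk_eq n;
      have hneq : n = "critical" := by rw [hm] at hrk; split_ifs at hrn <;> omega)]
  · -- m = -1 : no known name present
    simp [pvName, hnotmem "critical" (by omega), hnotmem "high" (by omega),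
      hnotmem "medium" (by omega), hnotmem "low" (by omega), hnotmem "none" (by omega)]
  · subst hneq
    simp [pvName, hn, hnotmem "critical" (by omega), hnotmem "high" (by omega),
      hnotmem "medium" (by omega), hnotmem "low" (by omega)]
  · subst hneq
    simp [pvName, hn, hnotmem "critical" (by omega), hnotmem "high" (by omega),
      hnotmem "medium" (by omega)]
  · subst hneq
    simp [pvName, hn, hnotmem "critical" (by omega), hnotmem "high" (by omega)]
  · subst hneq
    simp [pvName, hn, hnotmem "critical" (by omega)]
  · subst hneq
    simp [pvName, hn]

-- ===== VERDICT (by name: the statement is the Claim_ definition above) =====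
theorem max_severity_label_py_spec : Claim_equal_max_severity_label_py := by
  intro labels _
  unfold Spec_max_severity_label_py max_severity_label_py
  have h0 : (none : Option String) = pvName (-1) := by simp [pvName]
  rw [h0, pvALoop_eq labels (-1) (by norm_num), pvB_eq]
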